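-- pv_equiv track=rewrite | github.com/HieuAI2005/DocBot | backend/process/extract/mineru.py | _wrap_abstract_italic
-- ===== SOURCE A (Python) =====
-- def _wrap_abstract_italic(md: str) -> str:
--     """Wrap the first substantial paragraph (likely abstract) in italic formatting."""
--     lines = md.splitlines()
--     result = []
--     in_first_para = False
--     first_para_lines = []
--     found_first_para = False
--
--     for i, line in enumerate(lines):
--         stripped = line.strip()
--
--         # Skip initial headings and empty lines
--         if not found_first_para:
--             if not stripped or stripped.startswith('#'):
--                 result.append(line)
--                 continue
--
--             # Found the start of first paragraph
--             if len(stripped) > 50 and not stripped.startswith('```'):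
--                 in_first_para = True
--                 found_first_para = True
--                 first_para_lines.append(line)
--                 continue
--
--         # Collecting first paragraph
--         if in_first_para:
--             # End of paragraph
--             if not stripped:
--                 # Wrap collected paragraph in italic
--                 combined = ' '.join(l.strip() for l in first_para_lines)
--                 result.append(f"_{combined}_")
--                 result.append(line)  # Add the empty line
--                 in_first_para = False
--                 continue
--             else:
--                 first_para_lines.append(line)
--                 continue
--
--         result.append(line)
--
--     # If we ended while still in first paragraph
--     if in_first_para and first_para_lines:
--         combined = ' '.join(l.strip() for l in first_para_lines)
--         result.append(f"_{combined}_")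
--
--     return '\n'.join(result)
-- ===== SOURCE B (Python) =====
-- def _is_start(line):
--     s = line.strip()
--     return bool(s) and not s.startswith('#') and len(s) > 50 and not s.startswith('```')
--
--
-- def _wrap_abstract_italic(md: str) -> str:
--     """Wrap the first substantial paragraph (likely abstract) in italic formatting."""
--     lines = md.splitlines()
--     start = next((i for i, l in enumerate(lines) if _is_start(l)), None)
--     if start is None:
--         return '\n'.join(lines)
--     rest = lines[start:]
--     k = next((j for j, l in enumerate(rest) if not l.strip()), len(rest))
--     italic = '_' + ' '.join(l.strip() for l in rest[:k]) + '_'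
--     return '\n'.join(lines[:start] + [italic] + rest[k:])
-- ===== Notes on version B (the rewrite author's own statement) =====
-- stated objective: simpler
-- what changed: Replaced A's single-pass state machine (four mutable state variables: result, in_first_para, first_para_lines, found_first_para, with branch flags and a trailing flush) by two index searches -- the first start-of-paragraph line, then its terminating blank line -- followed by plain list slicing and one join.
import Mathlib
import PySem

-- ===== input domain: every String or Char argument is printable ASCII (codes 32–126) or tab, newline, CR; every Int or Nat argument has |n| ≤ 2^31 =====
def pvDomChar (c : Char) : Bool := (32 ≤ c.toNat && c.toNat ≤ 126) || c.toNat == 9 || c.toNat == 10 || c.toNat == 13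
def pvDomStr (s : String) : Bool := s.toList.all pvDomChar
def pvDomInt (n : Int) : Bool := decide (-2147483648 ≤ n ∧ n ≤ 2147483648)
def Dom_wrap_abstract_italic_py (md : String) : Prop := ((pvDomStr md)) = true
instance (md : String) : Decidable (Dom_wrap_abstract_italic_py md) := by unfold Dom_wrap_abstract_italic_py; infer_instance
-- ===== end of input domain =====

-- B replaces A's four-flag state machine by two index searches (start of the paragraph,
-- then its terminating blank line) and list slicing; objective: simpler. Return values only.

-- ===== PORT A =====
-- ' '.join(l.strip() for l in para) wrapped in underscores (appears verbatim in both Pythons)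
def pvItal (para : List String) : String :=
  "_" ++ PySem.Str.join " " (para.map PySem.Str.strip) ++ "_"

-- A's for-loop: state (result, in_first_para, first_para_lines, found_first_para);
-- the [] case carries A's trailing 'if in_first_para and first_para_lines' block.
def pvLoopA : List String → List String → Bool → List String → Bool → List String
  | [], result, inPara, para, _found =>
      if inPara && !para.isEmpty then result ++ [pvItal para] else result
  | line :: rest, result, inPara, para, found =>
      let s := PySem.Str.strip line
      if !found && (s == "" || PySem.Str.startswith s "#") then
        pvLoopA rest (result ++ [line]) inPara para found
      else if !found && (decide (50 < PySem.Str.len s) && !(PySem.Str.startswith s "```")) then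
        pvLoopA rest result true (para ++ [line]) true
      else if inPara then
        if s == "" then
          pvLoopA rest (result ++ [pvItal para, line]) false para found
        else
          pvLoopA rest result true (para ++ [line]) found
      else
        pvLoopA rest (result ++ [line]) inPara para found

def wrap_abstract_italic_py (md : String) : String :=
  PySem.Str.join "\n" (pvLoopA (PySem.Str.splitlines md) [] false [] false)

-- ===== PORT B =====
def pvIsStart (line : String) : Bool :=
  let s := PySem.Str.strip line
  !(s == "") && !(PySem.Str.startswith s "#") &&
    decide (50 < PySem.Str.len s) && !(PySem.Str.startswith s "```")

-- B's body on the split lines: find the start index, find the terminating blank, slice.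
def pvBodyB (lines : List String) : List String :=
  match lines.findIdx? pvIsStart with
  | none => lines
  | some start =>
      let rest := lines.drop start
      let k := (rest.findIdx? (fun l => PySem.Str.strip l == "")).getD rest.length
      lines.take start ++ [pvItal (rest.take k)] ++ rest.drop k

def wrap_abstract_italic_py_alt (md : String) : String :=
  PySem.Str.join "\n" (pvBodyB (PySem.Str.splitlines md))

-- ===== PRECONDITION & SPEC =====
def Spec_wrap_abstract_italic_py (md : String) (out : String) : Prop := out = wrap_abstract_italic_py_alt md
instance (md : String) (out : String) : Decidable (Spec_wrap_abstract_italic_py md out) := by unfold Spec_wrap_abstract_italic_py; infer_instance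

-- ===== CLAIM (what is proved, stated in full; the proofs are below) =====
def Claim_equal_wrap_abstract_italic_py : Prop := ∀ (md : String), Dom_wrap_abstract_italic_py md → Spec_wrap_abstract_italic_py md (wrap_abstract_italic_py md)

-- ===== LEMMAS AND PROOFS =====

-- Phase 3 (after the paragraph was closed): every remaining line is copied verbatim.
theorem pvLoopA_done (rest : List String) : ∀ (res para : List String),
    pvLoopA rest res false para true = res ++ rest := by
  induction rest with
  | nil => intro res para; simp [pvLoopA]
  | cons l ls ih => intro res para; simp [pvLoopA, ih]

-- Phase 2 (collecting the paragraph): it ends at the first blank-stripping line (or EOF).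
theorem pvLoopA_para (rest : List String) : ∀ (res para : List String), para ≠ [] →
    pvLoopA rest res true para true =
      res ++ [pvItal (para ++ rest.take ((rest.findIdx?
          (fun l => PySem.Str.strip l == "")).getD rest.length))] ++
        rest.drop ((rest.findIdx? (fun l => PySem.Str.strip l == "")).getD rest.length) := by
  induction rest with
  | nil => intro res para hp; simp [pvLoopA, hp]
  | cons l ls ih =>
    intro res para hp
    by_cases hb : PySem.Str.strip l == ""
    · simp [pvLoopA, hb, pvLoopA_done, List.findIdx?_cons]
    · have hk : ((List.findIdx? (fun l => PySem.Str.strip l == "") (l :: ls)).getD (l :: ls).length)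
          = ((List.findIdx? (fun l => PySem.Str.strip l == "") ls).getD ls.length) + 1 := by
        rw [List.findIdx?_cons]
        simp only [hb]
        cases List.findIdx? (fun l => PySem.Str.strip l == "") ls <;> simp
      rw [hk]
      simp only [pvLoopA, hb, List.take_succ_cons, List.drop_succ_cons]
      rw [ih res (para ++ [l]) (by simp)]
      simp

-- Phase 1 (before the paragraph): A copies non-start lines and hands over to phase 2.
theorem pvLoopA_eq_body (lines : List String) : ∀ (res : List String),
    pvLoopA lines res false [] false = res ++ pvBodyB lines := by
  induction lines with
  | nil => intro res; simp [pvLoopA, pvBodyB]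
  | cons l ls ih =>
    intro res
    by_cases hs : pvIsStart l
    · have h := hs
      simp only [pvIsStart, Bool.and_eq_true, Bool.not_eq_true'] at h
      obtain ⟨⟨⟨h1, h2⟩, h3⟩, h4⟩ := h
      have hstep : pvLoopA (l :: ls) res false [] false = pvLoopA ls res true [l] true := by
        simp at h2 h3 h4
        simp [pvLoopA, h1, h2, h3, h4]
      have hfind : List.findIdx? pvIsStart (l :: ls) = some 0 := by
        rw [List.findIdx?_cons]; simp [hs]
      rw [hstep, pvLoopA_para ls res [l] (by simp)]
      simp only [pvBodyB, hfind, List.drop_zero, List.take_zero, List.nil_append]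
      have hk : ((List.findIdx? (fun l => PySem.Str.strip l == "") (l :: ls)).getD (l :: ls).length)
          = ((List.findIdx? (fun l => PySem.Str.strip l == "") ls).getD ls.length) + 1 := by
        rw [List.findIdx?_cons]
        simp only [h1]
        cases List.findIdx? (fun l => PySem.Str.strip l == "") ls <;> simp
      rw [hk]
      simp
    · have hsb : pvIsStart l = false := Bool.eq_false_iff.mpr hs
      have hstep : pvLoopA (l :: ls) res false [] false = pvLoopA ls (res ++ [l]) false [] false := by
        by_cases h1 : (PySem.Str.strip l == "" || PySem.Str.startswith (PySem.Str.strip l) "#") = true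
        · simp [pvLoopA]
          intro hne hh hlen hbt
          exact absurd (show pvIsStart l = true by simp [pvIsStart, hne, hh, hlen, hbt]) hs
        · have h1b : (PySem.Str.strip l == "" || PySem.Str.startswith (PySem.Str.strip l) "#") = false :=
            Bool.eq_false_iff.mpr h1
          simp [pvLoopA]
          intro hne hh hlen hbt
          exact absurd (show pvIsStart l = true by simp [pvIsStart, hne, hh, hlen, hbt]) hs
      rw [hstep, ih]
      have hrec : pvBodyB (l :: ls) = l :: pvBodyB ls := by
        simp only [pvBodyB, List.findIdx?_cons, hsb]
        cases h : List.findIdx? pvIsStart ls with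
        | none => simp
        | some i => simp [List.take_succ_cons, List.drop_succ_cons]
      rw [hrec]
      simp

-- ===== VERDICT (by name: the statement is the Claim_ definition above) =====
theorem wrap_abstract_italic_py_spec : Claim_equal_wrap_abstract_italic_py := by
  intro md _
  show wrap_abstract_italic_py md = wrap_abstract_italic_py_alt md
  unfold wrap_abstract_italic_py wrap_abstract_italic_py_alt
  rw [pvLoopA_eq_body]
  simp
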